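-- pv_equiv track=rewrite | github.com/AlexeySorokin/NeuralMorphemeSegmentation | neural_morph_segm.py | get_next_morpheme
-- ===== SOURCE A (Python) =====
-- def get_next_morpheme_types(morpheme_type):
--     """
--     Определяет, какие морфемы могут идти за текущей.
--     """
--     if morpheme_type == "None":
--         return ["None"]
--     MORPHEMES = ["SUFF", "END", "LINK", "POSTFIX", "PREF", "ROOT"]
--     if morpheme_type in ["ROOT", "SUFF", "HYPH"]:
--         start = 0
--     elif morpheme_type == "END":
--         start = 2
--     elif morpheme_type in ["PREF", "LINK", "BEGIN"]:
--         start = 4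
--     else:
--         start = 6
--     answer = MORPHEMES[start:6]
--     if len(answer) > 0 and morpheme_type != "HYPH":
--         answer.append("HYPH")
--     if morpheme_type == "BEGIN":
--         answer.append("None")
--     return answer
--
-- def get_next_morpheme(morpheme):
--     """
--     Строит список меток, которые могут идти за текущей
--     """
--     if morpheme == "BEGIN":
--         morpheme = "S-BEGIN"
--     morpheme_label, morpheme_type = morpheme.split("-")
--     if morpheme_label in "BM":
--         new_morpheme_labels = "ME"
--         new_morpheme_types = [morpheme_type]
--     else:
--         new_morpheme_labels = "BS"
--         new_morpheme_types = get_next_morpheme_types(morpheme_type)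
--     answer = ["{}-{}".format(x, y) for x in new_morpheme_labels for y in new_morpheme_types]
--     return answer
-- ===== SOURCE B (Python) =====
-- # Table-driven re-implementation: the successor-type lists are precomputed in one
-- # static dict instead of being rebuilt by slicing/appending on every call.
-- _NEXT_TYPES = {
--     "ROOT": ["SUFF", "END", "LINK", "POSTFIX", "PREF", "ROOT", "HYPH"],
--     "SUFF": ["SUFF", "END", "LINK", "POSTFIX", "PREF", "ROOT", "HYPH"],
--     "HYPH": ["SUFF", "END", "LINK", "POSTFIX", "PREF", "ROOT"],
--     "END": ["LINK", "POSTFIX", "PREF", "ROOT", "HYPH"],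
--     "PREF": ["PREF", "ROOT", "HYPH"],
--     "LINK": ["PREF", "ROOT", "HYPH"],
--     "BEGIN": ["PREF", "ROOT", "HYPH", "None"],
--     "None": ["None"],
-- }
--
-- def get_next_morpheme(morpheme):
--     if morpheme == "BEGIN":
--         morpheme = "S-BEGIN"
--     label, typ = morpheme.split("-")
--     if label in "BM":
--         return [c + "-" + typ for c in "ME"]
--     return [c + "-" + t for c in "BS" for t in _NEXT_TYPES.get(typ, [])]
-- ===== Notes on version B (the rewrite author's own statement) =====
-- stated objective: simpler
-- what changed: Replaces the branchy start-index computation, list slicing and conditional HYPH/None appends of get_next_morpheme_types with a single precomputed static dict mapping each morpheme type to its full successor-type list, looked up with .get(typ, []).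
import Mathlib
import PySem

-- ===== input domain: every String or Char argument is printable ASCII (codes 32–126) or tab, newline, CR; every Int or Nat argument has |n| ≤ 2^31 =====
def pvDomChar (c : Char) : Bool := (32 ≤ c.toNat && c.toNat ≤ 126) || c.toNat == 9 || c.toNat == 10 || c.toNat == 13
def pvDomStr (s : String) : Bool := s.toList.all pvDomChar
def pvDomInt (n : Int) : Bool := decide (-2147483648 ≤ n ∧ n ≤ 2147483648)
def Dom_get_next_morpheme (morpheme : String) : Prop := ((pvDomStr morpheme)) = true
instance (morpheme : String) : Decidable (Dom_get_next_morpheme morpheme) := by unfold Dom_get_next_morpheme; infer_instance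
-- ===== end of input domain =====

-- B replaces A's computed slicing/appending by one static successor table; objective: simpler.

-- ===== PORT A =====
def get_next_morpheme_types (morpheme_type : String) : List String :=
  if morpheme_type = "None" then ["None"]
  else
    let MORPHEMES : List String := ["SUFF", "END", "LINK", "POSTFIX", "PREF", "ROOT"]
    let start : Int :=
      if morpheme_type = "ROOT" ∨ morpheme_type = "SUFF" ∨ morpheme_type = "HYPH" then 0
      else if morpheme_type = "END" then 2
      else if morpheme_type = "PREF" ∨ morpheme_type = "LINK" ∨ morpheme_type = "BEGIN" then 4
      else 6
    let answer := PySem.List.slice MORPHEMES (some start) (some 6)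
    let answer := if answer.length > 0 ∧ morpheme_type ≠ "HYPH" then answer ++ ["HYPH"] else answer
    if morpheme_type = "BEGIN" then answer ++ ["None"] else answer

def get_next_morpheme (morpheme : String) : List String :=
  let m := if morpheme = "BEGIN" then "S-BEGIN" else morpheme
  match PySem.Str.split? m "-" with
  | some [morpheme_label, morpheme_type] =>
    let p : String × List String :=
      if PySem.Str.isIn morpheme_label "BM" then ("ME", [morpheme_type])
      else ("BS", get_next_morpheme_types morpheme_type)
    p.1.toList.flatMap (fun x => p.2.map (fun y => String.ofList (x :: '-' :: y.toList)))
  | _ => []  -- Python raises ValueError here (split does not give exactly 2 parts); excluded by Pre_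

-- ===== PORT B =====
def nextTypesTable : PySem.Dict String (List String) := PySem.Dict.ofList
  [ ("ROOT", ["SUFF", "END", "LINK", "POSTFIX", "PREF", "ROOT", "HYPH"]),
    ("SUFF", ["SUFF", "END", "LINK", "POSTFIX", "PREF", "ROOT", "HYPH"]),
    ("HYPH", ["SUFF", "END", "LINK", "POSTFIX", "PREF", "ROOT"]),
    ("END", ["LINK", "POSTFIX", "PREF", "ROOT", "HYPH"]),
    ("PREF", ["PREF", "ROOT", "HYPH"]),
    ("LINK", ["PREF", "ROOT", "HYPH"]),
    ("BEGIN", ["PREF", "ROOT", "HYPH", "None"]),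
    ("None", ["None"]) ]

def get_next_morpheme_alt (morpheme : String) : List String :=
  let m := if morpheme = "BEGIN" then "S-BEGIN" else morpheme
  -- sep "-" is nonempty, so split? never returns none; the getD default is unreachable
  let parts := (PySem.Str.split? m "-").getD []
  if parts.length = 2 then
    let label := parts[0]!
    let typ := parts[1]!
    if PySem.Str.isIn label "BM" then
      "ME".toList.flatMap (fun c => [String.ofList (c :: '-' :: typ.toList)])
    else
      "BS".toList.flatMap (fun c =>
        (nextTypesTable.getD typ []).map (fun t => String.ofList (c :: '-' :: t.toList)))
  else []  -- not exactly 2 parts: Python raises ValueError here; excluded by Pre_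

-- ===== PRECONDITION & SPEC =====
-- Pre_ excludes exactly the inputs on which A (and B) raise ValueError: strings other
-- than "BEGIN" that do not contain exactly one '-' (the two-variable unpacking fails).
def Pre_get_next_morpheme (morpheme : String) : Prop :=
  morpheme = "BEGIN" ∨ morpheme.toList.count '-' = 1
instance (morpheme : String) : Decidable (Pre_get_next_morpheme morpheme) := by unfold Pre_get_next_morpheme; infer_instance
def pvWitness_get_next_morpheme : String := "S-ROOT"

def Spec_get_next_morpheme (morpheme : String) (out : List String) : Prop := out = get_next_morpheme_alt morpheme
instance (morpheme : String) (out : List String) : Decidable (Spec_get_next_morpheme morpheme out) := by unfold Spec_get_next_morpheme; infer_instance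

-- ===== CLAIM (what is proved, stated in full; the proofs are below) =====
def Claim_equal_get_next_morpheme : Prop := ∀ (morpheme : String), Dom_get_next_morpheme morpheme → Pre_get_next_morpheme morpheme → Spec_get_next_morpheme morpheme (get_next_morpheme morpheme)

-- ===== LEMMAS AND PROOFS =====

-- The static table agrees with A's computed successor lists on every type string.
theorem table_eq_types (t : String) :
    nextTypesTable.getD t [] = get_next_morpheme_types t := by
  by_cases h0 : t = "None"
  · subst h0; decide
  by_cases h1 : t = "ROOT"
  · subst h1; decide
  by_cases h2 : t = "SUFF"
  · subst h2; decide
  by_cases h3 : t = "HYPH"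
  · subst h3; decide
  by_cases h4 : t = "END"
  · subst h4; decide
  by_cases h5 : t = "PREF"
  · subst h5; decide
  by_cases h6 : t = "LINK"
  · subst h6; decide
  by_cases h7 : t = "BEGIN"
  · subst h7; decide
  simp [nextTypesTable, get_next_morpheme_types, PySem.Dict.getD, PySem.Dict.get?,
    PySem.Dict.ofList, PySem.Dict.update, PySem.Dict.insert, PySem.Dict.empty,
    List.find?, PySem.List.slice,
    beq_eq_false_iff_ne.mpr (Ne.symm h0), beq_eq_false_iff_ne.mpr (Ne.symm h1),
    beq_eq_false_iff_ne.mpr (Ne.symm h2), beq_eq_false_iff_ne.mpr (Ne.symm h3),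
    beq_eq_false_iff_ne.mpr (Ne.symm h4), beq_eq_false_iff_ne.mpr (Ne.symm h5),
    beq_eq_false_iff_ne.mpr (Ne.symm h6), beq_eq_false_iff_ne.mpr (Ne.symm h7),
    h0, h1, h2, h3, h4, h5, h6, h7]

-- ===== VERDICT (by name: the statement is the Claim_ definition above) =====
theorem get_next_morpheme_spec : Claim_equal_get_next_morpheme := by
  intro morpheme _ _
  unfold Spec_get_next_morpheme get_next_morpheme get_next_morpheme_alt
  cases h : PySem.Str.split? (if morpheme = "BEGIN" then "S-BEGIN" else morpheme) "-" with
  | none => simp [h]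
  | some parts =>
    match parts with
    | [] => simp [h]
    | [_] => simp [h]
    | _ :: _ :: _ :: _ => simp [h]
    | [label, typ] =>
      by_cases hb : PySem.Chars.isIn label.toList ['B', 'M'] = true <;>
        simp [h, hb, table_eq_types]
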